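-- pv_equiv track=rewrite | github.com/khuushichand/aiml-project | tldw_Server_API/app/core/Claims_Extraction/alignment.py | _normalize_text_with_map
-- ===== SOURCE A (Python) =====
-- def _normalize_text_with_map(text: str) -> tuple[str, list[int]]:
--     if not text:
--         return "", []
--     normalized: list[str] = []
--     index_map: list[int] = []
--     prev_space = False
--     for idx, ch in enumerate(text):
--         if ch.isspace():
--             if prev_space:
--                 continue
--             normalized.append(" ")
--             index_map.append(idx)
--             prev_space = True
--             continue
--         prev_space = False
--         folded = ch.casefold()
--         for folded_char in folded:
--             normalized.append(folded_char)
--             index_map.append(idx)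
--     start = 0
--     end = len(normalized)
--     while start < end and normalized[start] == " ":
--         start += 1
--     while end > start and normalized[end - 1] == " ":
--         end -= 1
--     return "".join(normalized[start:end]), index_map[start:end]
-- ===== SOURCE B (Python) =====
-- def _normalize_text_with_map(text: str) -> tuple[str, list[int]]:
--     # Pipeline decomposition: expand every char to (folded_char, idx) pairs,
--     # collapse runs of spaces by comparing each pair with its predecessor,
--     # then trim with lstrip/rstrip length arithmetic (no state-machine flag).
--     pairs = [(fc, idx)
--              for idx, ch in enumerate(text)
--              for fc in ((" ",) if ch.isspace() else ch.casefold())]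
--     if not pairs:
--         return "", []
--     collapsed = [pairs[0]] + [q for p, q in zip(pairs, pairs[1:])
--                               if not (q[0] == " " and p[0] == " ")]
--     s = "".join(c for c, _ in collapsed)
--     start = len(s) - len(s.lstrip(" "))
--     end = len(s.rstrip(" "))
--     return s[start:end], [i for _, i in collapsed[start:end]]
-- ===== Notes on version B (the rewrite author's own statement) =====
-- stated objective: alternative
-- what changed: Replaced A's single-pass prev_space state machine and two index while-loops by a three-stage pipeline: expand every char to (folded_char, index) pairs, collapse adjacent spaces by comparing each pair with its predecessor via zip, and trim using lstrip/rstrip length arithmetic.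
import Mathlib
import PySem

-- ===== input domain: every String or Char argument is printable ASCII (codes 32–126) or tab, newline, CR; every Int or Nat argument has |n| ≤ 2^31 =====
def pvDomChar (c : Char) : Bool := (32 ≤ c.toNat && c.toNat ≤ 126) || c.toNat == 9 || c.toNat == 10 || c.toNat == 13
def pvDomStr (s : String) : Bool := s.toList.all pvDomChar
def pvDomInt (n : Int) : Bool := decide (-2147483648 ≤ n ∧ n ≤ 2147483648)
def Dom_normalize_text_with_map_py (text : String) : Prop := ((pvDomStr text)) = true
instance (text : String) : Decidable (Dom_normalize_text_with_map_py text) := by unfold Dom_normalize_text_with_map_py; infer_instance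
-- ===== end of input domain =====

-- B replaces A's prev_space state machine by a three-stage pipeline (expand to pairs,
-- collapse adjacent spaces against the predecessor pair, trim by lstrip/rstrip lengths);
-- objective: alternative decomposition, same cost.


-- ch.casefold(): on the printable-ASCII domain casefold = lower and yields one char; exact there.
def pyCasefold (c : Char) : List Char := [PySem.Chars.lowerChar c]

-- ===== PORT A =====
-- the `for idx, ch in enumerate(text)` loop with its state (normalized, index_map, prev_space)
def loopA : List (Int × Char) → Bool → List Char → List Int → List Char × List Int
  | [], _, normalized, index_map => (normalized, index_map)
  | (idx, ch) :: rest, prev_space, normalized, index_map =>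
    if PySem.Chars.isspace ch then
      if prev_space then loopA rest prev_space normalized index_map
      else loopA rest true (normalized ++ [' ']) (index_map ++ [idx])
    else
      -- `for folded_char in folded: append`
      loopA rest false (normalized ++ pyCasefold ch) (index_map ++ (pyCasefold ch).map (fun _ => idx))

-- `while start < end and normalized[start] == " ": start += 1`  (start < stop ≤ len, so getD is in range)
def findStart (normalized : List Char) (start stop : Nat) : Nat :=
  if start < stop ∧ normalized.getD start ' ' = ' ' then findStart normalized (start + 1) stop
  else start
termination_by stop - start
decreasing_by omega

-- `while end > start and normalized[end - 1] == " ": end -= 1`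
def findEnd (normalized : List Char) (start stop : Nat) : Nat :=
  if start < stop ∧ normalized.getD (stop - 1) ' ' = ' ' then findEnd normalized start (stop - 1)
  else stop
termination_by stop
decreasing_by omega

def normalize_text_with_map_py (text : String) : String × List Int :=
  if text.toList = [] then ("", [])          -- `if not text`
  else
    let r := loopA (PySem.List.enumerate text.toList 0) false [] []
    let start := findStart r.1 0 r.1.length
    let stop := findEnd r.1 start r.1.length
    -- xs[start:end] with 0 ≤ start ≤ end ≤ len: drop/take is exact here
    (String.ofList ((r.1.drop start).take (stop - start)), (r.2.drop start).take (stop - start))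

-- ===== PORT B =====
-- the double comprehension body: one original char → its (folded_char, idx) pairs
def stepB (p : Int × Char) : List (Char × Int) :=
  if PySem.Chars.isspace p.2 then [(' ', p.1)]
  else (pyCasefold p.2).map (fun fc => (fc, p.1))

def pairsB (text : String) : List (Char × Int) :=
  (PySem.List.enumerate text.toList 0).flatMap stepB

def normalize_text_with_map_py_alt (text : String) : String × List Int :=
  match pairsB text with
  | [] => ("", [])                           -- `if not pairs`
  | x :: rest =>
    -- `[pairs[0]] + [q for p, q in zip(pairs, pairs[1:]) if not (q[0]==" " and p[0]==" ")]`
    let collapsed := x :: ((x :: rest).zip rest).filterMap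
        (fun pq => if pq.2.1 = ' ' ∧ pq.1.1 = ' ' then none else some pq.2)
    let s := collapsed.map Prod.fst
    -- `len(s) - len(s.lstrip(" "))` / `len(s.rstrip(" "))`: strip set is exactly {' '}
    let start := s.length - (s.dropWhile (fun c => c = ' ')).length
    let stop := ((s.reverse.dropWhile (fun c => c = ' ')).reverse).length
    (String.ofList ((s.drop start).take (stop - start)),
     ((collapsed.map Prod.snd).drop start).take (stop - start))

-- ===== PRECONDITION & SPEC =====
def Spec_normalize_text_with_map_py (text : String) (out : String × List Int) : Prop := out = normalize_text_with_map_py_alt text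
instance (text : String) (out : String × List Int) : Decidable (Spec_normalize_text_with_map_py text out) := by unfold Spec_normalize_text_with_map_py; infer_instance

-- ===== CLAIM (what is proved, stated in full; the proofs are below) =====
def Claim_equal_normalize_text_with_map_py : Prop := ∀ (text : String), Dom_normalize_text_with_map_py text → Spec_normalize_text_with_map_py text (normalize_text_with_map_py text)

-- ===== LEMMAS AND PROOFS =====

-- casefold of a non-space char is never a space
lemma lowerChar_ne_space (c : Char) (h : PySem.Chars.isspace c = false) :
    PySem.Chars.lowerChar c ≠ ' ' := by
  unfold PySem.Chars.lowerChar
  split_ifs with hu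
  · have h1 : 'A' ≤ c ∧ c ≤ 'Z' := by simpa [PySem.Chars.isupper] using hu
    have h65 : 65 ≤ c.toNat := h1.1
    have h90 : c.toNat ≤ 90 := h1.2
    intro he
    have hv : (Char.ofNat (c.toNat + 32)).toNat = c.toNat + 32 := by
      rw [Char.toNat_ofNat, if_pos]
      left; omega
    rw [he] at hv
    have : (' ' : Char).toNat = 32 := rfl
    omega
  · intro he
    rw [he] at h
    simp [PySem.Chars.isspace] at h

-- collapse with an explicit "previous char was a space" flag (proof-side reformulation)
def collAux : Bool → List (Char × Int) → List (Char × Int)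
  | _, [] => []
  | prev, (c, i) :: rest =>
    if c = ' ' then (if prev then collAux true rest else (c, i) :: collAux true rest)
    else (c, i) :: collAux false rest

lemma zip_filter_eq_collAux (rest : List (Char × Int)) : ∀ x : Char × Int,
    ((x :: rest).zip rest).filterMap
        (fun pq => if pq.2.1 = ' ' ∧ pq.1.1 = ' ' then none else some pq.2)
      = collAux (x.1 = ' ') rest := by
  induction rest with
  | nil => intro x; simp [collAux]
  | cons y ys ih =>
    intro x
    obtain ⟨c, i⟩ := y
    have h2 := ih (c, i)
    simp only [List.zip_cons_cons, List.filterMap_cons]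
    by_cases hc : c = ' ' <;> by_cases hx : x.1 = ' ' <;>
      simp [collAux, hc, hx, h2] <;> simp [hc] at h2 <;> exact h2

lemma collAux_false_cons (c : Char) (i : Int) (rest : List (Char × Int)) :
    collAux false ((c, i) :: rest) = (c, i) :: collAux (c = ' ') rest := by
  by_cases hc : c = ' ' <;> simp [collAux, hc]

lemma loopA_eq_collAux (l : List (Int × Char)) : ∀ (prev : Bool) (ns : List Char) (im : List Int),
    loopA l prev ns im
      = (ns ++ (collAux prev (l.flatMap stepB)).map Prod.fst,
         im ++ (collAux prev (l.flatMap stepB)).map Prod.snd) := by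
  induction l with
  | nil => intro prev ns im; simp [loopA, collAux]
  | cons p rest ih =>
    intro prev ns im
    obtain ⟨idx, ch⟩ := p
    by_cases hsp : PySem.Chars.isspace ch = true
    · cases prev with
      | true =>
        simp only [loopA, hsp, if_true, List.flatMap_cons, stepB, collAux]
        simpa [collAux] using ih true ns im
      | false =>
        simp only [loopA, hsp, if_true, Bool.false_eq_true, ite_false, List.flatMap_cons, stepB, collAux]
        rw [ih true (ns ++ [' ']) (im ++ [idx])]
        simp [collAux]
    · have hsp' : PySem.Chars.isspace ch = false := by simpa using hsp
      have hne := lowerChar_ne_space ch hsp'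
      simp only [loopA, hsp', if_neg, List.flatMap_cons, stepB, Bool.false_eq_true, ite_false]
      rw [ih false (ns ++ pyCasefold ch) (im ++ (pyCasefold ch).map (fun _ => idx))]
      simp [pyCasefold, collAux, hne]

lemma findStart_shift (cs : List Char) (c : Char) : ∀ (d k m : Nat), m - k = d →
    findStart (c :: cs) (k + 1) (m + 1) = findStart cs k m + 1 := by
  intro d
  induction d with
  | zero =>
    intro k m hd
    conv_lhs => rw [findStart]
    conv_rhs => rw [findStart]
    have n1 : ¬(k + 1 < m + 1 ∧ (c :: cs).getD (k + 1) ' ' = ' ') := fun h => by omega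
    have n2 : ¬(k < m ∧ cs.getD k ' ' = ' ') := fun h => by omega
    rw [if_neg n1, if_neg n2]
  | succ d ih =>
    intro k m hd
    have hkm : k < m := by omega
    conv_lhs => rw [findStart]
    conv_rhs => rw [findStart]
    simp only [List.getD_cons_succ]
    by_cases hc : cs.getD k ' ' = ' '
    · have c1 : k + 1 < m + 1 ∧ cs.getD k ' ' = ' ' := ⟨by omega, hc⟩
      have c2 : k < m ∧ cs.getD k ' ' = ' ' := ⟨hkm, hc⟩
      rw [if_pos c1, if_pos c2]
      exact ih (k + 1) m (by omega)
    · have n1 : ¬(k + 1 < m + 1 ∧ cs.getD k ' ' = ' ') := by tauto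
      have n2 : ¬(k < m ∧ cs.getD k ' ' = ' ') := by tauto
      rw [if_neg n1, if_neg n2]

lemma findStart_eq_takeWhile (s : List Char) :
    findStart s 0 s.length = (s.takeWhile (fun c => c = ' ')).length := by
  induction s with
  | nil => rw [findStart]; simp
  | cons c cs ih =>
    by_cases hc : c = ' '
    · rw [findStart, if_pos ⟨by simp, by simpa using hc⟩]
      rw [show (c :: cs).length = cs.length + 1 from rfl]
      rw [findStart_shift cs c (cs.length - 0) 0 cs.length rfl]
      simp [List.takeWhile_cons, hc, ih]
    · rw [findStart, if_neg (by simp [hc])]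
      simp [List.takeWhile_cons, hc]

lemma findEnd_append (cs : List Char) (c : Char) (start : Nat) : ∀ (stop : Nat), stop ≤ cs.length →
    findEnd (cs ++ [c]) start stop = findEnd cs start stop := by
  intro stop
  induction stop with
  | zero =>
    intro _
    conv_lhs => rw [findEnd]
    conv_rhs => rw [findEnd]
    rw [if_neg (fun h => by omega : ¬(start < 0 ∧ (cs ++ [c]).getD (0 - 1) ' ' = ' ')),
        if_neg (fun h => by omega : ¬(start < 0 ∧ cs.getD (0 - 1) ' ' = ' '))]
  | succ n ih =>
    intro hle
    have hg : (cs ++ [c]).getD n ' ' = cs.getD n ' ' := by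
      simp [List.getD, List.getElem?_append_left (by omega : n < cs.length)]
    conv_lhs => rw [findEnd]
    conv_rhs => rw [findEnd]
    simp only [Nat.add_sub_cancel, hg]
    by_cases hcond : start < n + 1 ∧ cs.getD n ' ' = ' '
    · rw [if_pos hcond, if_pos hcond]
      exact ih (by omega)
    · rw [if_neg hcond, if_neg hcond]

lemma findEnd_eq (s : List Char) : ∀ (start : Nat), start ≤ s.length →
    findEnd s start s.length = max start (s.length - (s.reverse.takeWhile (fun c => c = ' ')).length) := by
  induction s using List.reverseRecOn with
  | nil =>
    intro start h
    have h0 : start = 0 := by simpa using h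
    subst h0
    rw [findEnd, if_neg (by simp)]
    simp
  | append_singleton cs c ih =>
    intro start h
    have hlen : (cs ++ [c]).length = cs.length + 1 := by simp
    have hg : (cs ++ [c]).getD ((cs ++ [c]).length - 1) ' ' = c := by
      simp [hlen, List.getD]
    by_cases hc : c = ' '
    · by_cases hlt : start < (cs ++ [c]).length
      · rw [findEnd, if_pos ⟨hlt, by rw [hg]; exact hc⟩]
        rw [hlen]
        simp only [Nat.add_sub_cancel]
        rw [findEnd_append cs c start cs.length le_rfl]
        rw [ih start (by omega)]
        have : (cs ++ [c]).reverse.takeWhile (fun x => x = ' ')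
            = ' ' :: cs.reverse.takeWhile (fun x => x = ' ') := by
          simp [hc, List.takeWhile_cons]
        rw [this]
        simp only [hlen, List.length_cons]
        omega
      · rw [findEnd, if_neg (by tauto)]
        have htw : ((cs ++ [c]).reverse.takeWhile (fun x => x = ' ')).length ≤ (cs ++ [c]).length := by
          simpa using (List.takeWhile_sublist _ (l := (cs ++ [c]).reverse)).length_le
        omega
    · rw [findEnd]
      rw [if_neg (by rw [hg]; tauto)]
      have : (cs ++ [c]).reverse.takeWhile (fun x => x = ' ') = [] := by
        simp [List.takeWhile_cons, hc]
      rw [this]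
      simp
      omega

lemma stepB_ne_nil (p : Int × Char) : stepB p ≠ [] := by
  unfold stepB pyCasefold
  split <;> simp

lemma length_dropWhile_reverse (s : List Char) :
    ((s.reverse.dropWhile (fun c => c = ' ')).reverse).length
      = s.length - (s.reverse.takeWhile (fun c => c = ' ')).length := by
  have h := List.takeWhile_append_dropWhile (p := fun c => (c = ' ' : Bool)) (l := s.reverse)
  have hl := congrArg List.length h
  simp only [List.length_append, List.length_reverse] at hl ⊢
  omega

lemma length_dropWhile_sub (s : List Char) :
    s.length - (s.dropWhile (fun c => c = ' ')).length
      = (s.takeWhile (fun c => c = ' ')).length := by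
  have h := List.takeWhile_append_dropWhile (p := fun c => (c = ' ' : Bool)) (l := s)
  have hl := congrArg List.length h
  simp only [List.length_append] at hl
  omega

-- ===== VERDICT (by name: the statement is the Claim_ definition above) =====
theorem normalize_text_with_map_py_spec : Claim_equal_normalize_text_with_map_py := by
  intro text _
  unfold Spec_normalize_text_with_map_py
  by_cases hl : text.toList = []
  · simp [normalize_text_with_map_py, normalize_text_with_map_py_alt, pairsB, hl,
      PySem.List.enumerate]
  · -- the pair list is nonempty
    obtain ⟨a, as, hcons⟩ := List.exists_cons_of_ne_nil hl
    have hPne : (PySem.List.enumerate text.toList 0).flatMap stepB ≠ [] := by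
      rw [hcons, PySem.List.enumerate_cons, List.flatMap_cons]
      intro h
      exact stepB_ne_nil (0, a) (List.append_eq_nil_iff.mp h).1
    obtain ⟨x, rest, hP⟩ := List.exists_cons_of_ne_nil hPne
    -- the collapsed pair list is A's loop output
    set C := collAux false ((PySem.List.enumerate text.toList 0).flatMap stepB) with hC
    have hcoll : (x :: ((x :: rest).zip rest).filterMap
        (fun pq => if pq.2.1 = ' ' ∧ pq.1.1 = ' ' then none else some pq.2)) = C := by
      obtain ⟨c, i⟩ := x
      rw [zip_filter_eq_collAux, hC, hP, collAux_false_cons]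
    have hloop : loopA (PySem.List.enumerate text.toList 0) false [] []
        = (C.map Prod.fst, C.map Prod.snd) := by
      rw [loopA_eq_collAux]
      simp [hC]
    -- trim indices agree
    set s := C.map Prod.fst with hs
    have htw : findStart s 0 s.length = (s.takeWhile (fun c => c = ' ')).length :=
      findStart_eq_takeWhile s
    have htwle : (s.takeWhile (fun c => c = ' ')).length ≤ s.length :=
      (List.takeWhile_sublist _).length_le
    have hrwle : (s.reverse.takeWhile (fun c => c = ' ')).length ≤ s.length := by
      simpa using (List.takeWhile_sublist (fun c => (c = ' ' : Bool)) (l := s.reverse)).length_le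
    have hfe : findEnd s (s.takeWhile (fun c => c = ' ')).length s.length
        = max (s.takeWhile (fun c => c = ' ')).length
              (s.length - (s.reverse.takeWhile (fun c => c = ' ')).length) :=
      findEnd_eq s _ htwle
    -- assemble
    unfold normalize_text_with_map_py normalize_text_with_map_py_alt pairsB
    rw [if_neg hl, hloop, hP]
    dsimp only
    rw [hcoll]
    simp only [← hs]
    rw [htw, hfe, length_dropWhile_sub, length_dropWhile_reverse]
    have hlen : ∀ m : Nat,
        max (s.takeWhile (fun c => c = ' ')).length m - (s.takeWhile (fun c => c = ' ')).length
          = m - (s.takeWhile (fun c => c = ' ')).length := fun m => by omega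
    rw [hlen]
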